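-- pv_equiv track=rewrite | github.com/LUCKYALI1/GFG_POD_SOLUTIONS | January_2026/06_max_xor_subarray_k.py.py | max_xor_bruteforce
-- ===== SOURCE A (Python) =====
-- def max_xor_bruteforce(arr, k):
--     n = len(arr)
--     ans = 0
--
--     for i in range(n - k + 1):
--         xor_value = 0
--         for j in range(i, i + k):
--             xor_value ^= arr[j]
--
--         ans = max(ans, xor_value)
--
--     return ans
-- ===== SOURCE B (Python) =====
-- def max_xor_bruteforce(arr, k):
--     n = len(arr)
--     if k <= 0 or k > n:
--         return 0
--     prefix = [0]
--     acc = 0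
--     for x in arr:
--         acc ^= x
--         prefix.append(acc)
--     best = 0
--     for i in range(n - k + 1):
--         best = max(best, prefix[i + k] ^ prefix[i])
--     return best
-- ===== Notes on version B (the rewrite author's own statement) =====
-- stated objective: faster
-- what changed: Replaces the O(n*k) re-scan of every window with a prefix-XOR array so each window's XOR is one lookup: prefix[i+k]^prefix[i].
import Mathlib
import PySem

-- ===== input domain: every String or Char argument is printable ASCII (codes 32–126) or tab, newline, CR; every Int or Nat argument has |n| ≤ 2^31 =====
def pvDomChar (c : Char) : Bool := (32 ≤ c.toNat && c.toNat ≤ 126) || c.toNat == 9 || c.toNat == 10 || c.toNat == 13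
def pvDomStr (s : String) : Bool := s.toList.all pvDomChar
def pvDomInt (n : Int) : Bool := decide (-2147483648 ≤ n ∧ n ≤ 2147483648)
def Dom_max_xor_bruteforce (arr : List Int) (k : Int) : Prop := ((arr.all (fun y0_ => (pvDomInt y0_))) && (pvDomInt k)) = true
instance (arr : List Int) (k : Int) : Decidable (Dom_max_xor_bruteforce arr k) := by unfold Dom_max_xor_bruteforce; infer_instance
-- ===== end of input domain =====

-- B replaces A's O(n*k) per-window re-scan by a prefix-XOR array (one lookup per window); objective: faster.

-- ===== PORT A =====
-- literal port of A; arr[j] is always in range here (j ∈ [i, i+k) ⊆ [0, n)), so pyGetD is exact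
def max_xor_bruteforce (arr : List Int) (k : Int) : Int :=
  let n : Int := arr.length
  (PySem.List.pyRange 0 (n - k + 1)).foldl
    (fun ans i =>
      max ans
        ((PySem.List.pyRange i (i + k)).foldl
          (fun xor_value j => PySem.Int.bxor xor_value (PySem.List.pyGetD arr j 0)) 0))
    0

-- ===== PORT B =====
-- literal port of Source B; prefix[i] and prefix[i+k] are always in range, so pyGetD is exact
def max_xor_bruteforce_alt (arr : List Int) (k : Int) : Int :=
  let n : Int := arr.length
  if k ≤ 0 ∨ n < k then 0
  else
    let pa := arr.foldl
      (fun (s : List Int × Int) x =>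
        (s.1 ++ [PySem.Int.bxor s.2 x], PySem.Int.bxor s.2 x)) ([0], 0)
    (PySem.List.pyRange 0 (n - k + 1)).foldl
      (fun best i =>
        max best (PySem.Int.bxor (PySem.List.pyGetD pa.1 (i + k) 0) (PySem.List.pyGetD pa.1 i 0)))
      0

-- ===== PRECONDITION & SPEC =====
def Spec_max_xor_bruteforce (arr : List Int) (k : Int) (out : Int) : Prop := out = max_xor_bruteforce_alt arr k
instance (arr : List Int) (k : Int) (out : Int) : Decidable (Spec_max_xor_bruteforce arr k out) := by unfold Spec_max_xor_bruteforce; infer_instance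

-- ===== CLAIM (what is proved, stated in full; the proofs are below) =====
def Claim_equal_max_xor_bruteforce : Prop := ∀ (arr : List Int) (k : Int), Dom_max_xor_bruteforce arr k → Spec_max_xor_bruteforce arr k (max_xor_bruteforce arr k)

-- ===== LEMMAS AND PROOFS =====

-- bxor on Int constructors (Python's infinite two's complement)
theorem bxor_ofNat_ofNat (m n : Nat) :
    PySem.Int.bxor (Int.ofNat m) (Int.ofNat n) = Int.ofNat (m ^^^ n) := by
  simp [PySem.Int.bxor]

theorem bxor_ofNat_negSucc (m n : Nat) :
    PySem.Int.bxor (Int.ofNat m) (Int.negSucc n) = Int.negSucc (m ^^^ n) := by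
  rw [Int.ofNat_eq_natCast, Int.negSucc_eq, Int.negSucc_eq]
  have h1 : ¬ (0 : Int) ≤ -((n : Int) + 1) := by omega
  have h2 : (0 : Int) ≤ (m : Int) := by omega
  have h3 : ((m : Int)).toNat = m := by omega
  have h4 : ((- -((n : Int) + 1)) - 1).toNat = n := by omega
  simp only [PySem.Int.bxor, if_pos h2, if_neg h1, h3, h4]
  omega

theorem bxor_negSucc_ofNat (m n : Nat) :
    PySem.Int.bxor (Int.negSucc m) (Int.ofNat n) = Int.negSucc (m ^^^ n) := by
  rw [PySem.Int.bxor_comm, bxor_ofNat_negSucc, Nat.xor_comm]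

theorem bxor_negSucc_negSucc (m n : Nat) :
    PySem.Int.bxor (Int.negSucc m) (Int.negSucc n) = Int.ofNat (m ^^^ n) := by
  rw [Int.negSucc_eq, Int.negSucc_eq, Int.ofNat_eq_natCast]
  have h1 : ¬ (0 : Int) ≤ -((m : Int) + 1) := by omega
  have h2 : ¬ (0 : Int) ≤ -((n : Int) + 1) := by omega
  have h3 : ((- -((m : Int) + 1)) - 1).toNat = m := by omega
  have h4 : ((- -((n : Int) + 1)) - 1).toNat = n := by omega
  simp only [PySem.Int.bxor, if_neg h1, if_neg h2, h3, h4]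

theorem bxor_assoc (a b c : Int) :
    PySem.Int.bxor (PySem.Int.bxor a b) c = PySem.Int.bxor a (PySem.Int.bxor b c) := by
  rcases a with m | m <;> rcases b with n | n <;> rcases c with p | p <;>
    simp only [bxor_ofNat_ofNat, bxor_ofNat_negSucc, bxor_negSucc_ofNat,
      bxor_negSucc_negSucc, Nat.xor_assoc]

-- XOR of the first m elements (the value prefix[m] in Source B)
def pxor (arr : List Int) (m : Nat) : Int := (arr.take m).foldl PySem.Int.bxor 0

-- Source B's prefix-building loop produces exactly [pxor arr 0, …, pxor arr n] with acc = pxor arr n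
theorem build_eq (arr : List Int) :
    arr.foldl
      (fun (s : List Int × Int) x =>
        (s.1 ++ [PySem.Int.bxor s.2 x], PySem.Int.bxor s.2 x)) ([0], 0)
    = ((List.range (arr.length + 1)).map (pxor arr), pxor arr arr.length) := by
  induction arr using List.reverseRecOn with
  | nil => simp [pxor]
  | append_singleton xs x ih =>
    rw [List.foldl_append, ih]
    have hlast : pxor (xs ++ [x]) (xs.length + 1) = PySem.Int.bxor (pxor xs xs.length) x := by
      unfold pxor
      rw [show xs.length + 1 = (xs ++ [x]).length by simp, List.take_length,
        List.foldl_append, List.take_length]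
      rfl
    have hmap : (List.range (xs.length + 1)).map (pxor (xs ++ [x]))
        = (List.range (xs.length + 1)).map (pxor xs) := by
      apply List.map_congr_left
      intro m hm
      rw [List.mem_range] at hm
      unfold pxor
      rw [List.take_append_of_le_length (by omega)]
    simp only [List.foldl_cons, List.foldl_nil, List.length_append, List.length_singleton,
      List.range_succ (n := xs.length + 1), List.map_append, hmap, List.map_singleton, hlast]

-- the inner window loop of A equals a difference of two prefix XORs
theorem win (arr : List Int) (a c : Nat) (h : a + c ≤ arr.length) :
    (PySem.List.pyRange (a : Int) ((a : Int) + (c : Int))).foldl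
      (fun xv j => PySem.Int.bxor xv (PySem.List.pyGetD arr j 0)) 0
    = PySem.Int.bxor (pxor arr (a + c)) (pxor arr a) := by
  induction c with
  | zero =>
    rw [show ((a : Int) + ((0 : Nat) : Int)) = (a : Int) by push_cast; ring,
      PySem.List.pyRange_one_eq_nil le_rfl]
    simp [PySem.Int.bxor_self]
  | succ c ih =>
    have hc : a + c ≤ arr.length := by omega
    have hlt : a + c < arr.length := by omega
    rw [show ((a : Int) + ((c + 1 : Nat) : Int)) = ((a : Int) + (c : Nat)) + 1 by push_cast; ring,
      PySem.List.pyRange_one_succ_right (by omega), List.foldl_append, ih hc]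
    have hget : PySem.List.pyGetD arr ((a : Int) + (c : Nat)) 0 = arr[a + c] := by
      rw [show ((a : Int) + (c : Nat)) = ((a + c : Nat) : Int) by push_cast; ring,
        PySem.List.pyGetD_natCast, List.getD_eq_getElem arr 0 hlt]
    have hp : pxor arr (a + (c + 1)) = PySem.Int.bxor (pxor arr (a + c)) arr[a + c] := by
      unfold pxor
      rw [show a + (c + 1) = (a + c) + 1 by omega, List.take_add_one,
        List.getElem?_eq_getElem hlt]
      rw [List.foldl_append]
      rfl
    simp only [List.foldl_cons, List.foldl_nil, hget, hp]
    rw [bxor_assoc, PySem.Int.bxor_comm (pxor arr a) arr[a + c], ← bxor_assoc]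

theorem foldl_max_zero (l : List Int) :
    l.foldl (fun (a : Int) (_ : Int) => max a 0) 0 = 0 := by
  induction l with
  | nil => rfl
  | cons x t ih => simpa using ih

theorem max_xor_bruteforce_eq (arr : List Int) (k : Int) :
    max_xor_bruteforce arr k = max_xor_bruteforce_alt arr k := by
  simp only [max_xor_bruteforce, max_xor_bruteforce_alt]
  by_cases hk : k ≤ 0
  · rw [if_pos (Or.inl hk)]
    rw [PySem.List.foldl_congr_mem _ _ (fun (a : Int) (_ : Int) => max a 0) 0
      (by
        intro acc i _
        rw [PySem.List.pyRange_one_eq_nil (by omega : i + k ≤ i)]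
        rfl)]
    exact foldl_max_zero _
  · rw [not_le] at hk
    by_cases hnk : (arr.length : Int) < k
    · rw [if_pos (Or.inr hnk), PySem.List.pyRange_one_eq_nil (by omega)]
      rfl
    · rw [not_lt] at hnk
      rw [if_neg (by omega), build_eq]
      apply PySem.List.foldl_congr_mem
      intro acc i hi
      rw [PySem.List.mem_pyRange_one] at hi
      obtain ⟨a, rfl⟩ : ∃ a : Nat, (a : Int) = i := ⟨i.toNat, Int.toNat_of_nonneg hi.1⟩
      obtain ⟨c, rfl⟩ : ∃ c : Nat, (c : Int) = k := ⟨k.toNat, Int.toNat_of_nonneg (le_of_lt hk)⟩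
      have hac : a + c ≤ arr.length := by
        have := hi.2
        omega
      congr 1
      rw [win arr a c hac,
        show ((a : Int) + (c : Nat)) = ((a + c : Nat) : Int) by push_cast; ring,
        PySem.List.pyGetD_natCast, PySem.List.pyGetD_natCast,
        PySem.List.getD_map_range _ _ _ _ (by omega),
        PySem.List.getD_map_range _ _ _ _ (by omega)]

-- ===== VERDICT (by name: the statement is the Claim_ definition above) =====
theorem max_xor_bruteforce_spec : Claim_equal_max_xor_bruteforce := by
  intro arr k _
  unfold Spec_max_xor_bruteforce
  exact max_xor_bruteforce_eq arr k
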